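-- pv_equiv track=rewrite | github.com/akashsngg99/ImageProcessing | utils/net_compiler.py | __find_all_decimal__
-- ===== SOURCE A (Python) =====
-- def isac(c):
--     """
--     A simple function, which determine whether the
--     string element char c is belong to a decimal number
--     :param c: a string element type of char
--     :return: a bool type of determination
--     """
--     try:
--         int(c)
--         return True
--     except:
--         if c == '.' or c == '-' or c == 'e':
--             return True
--         else:
--             return False
--
-- def __find_all_decimal__(string_phase):
--     """
--     A function to find series of decimal
--     :param string_phase: string type key like moving_average_fraction
--     :return: a list stores decimals found in string_phase
--     """
--     decimals = ""
--     for index in range(len(string_phase)):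
--         if isac(string_phase[index]):
--             decimals += string_phase[index]
--         else:
--             decimals += ' '
--     return decimals.split(' ')
-- ===== SOURCE B (Python) =====
-- def isac(c):
--     try:
--         int(c)
--         return True
--     except:
--         if c == '.' or c == '-' or c == 'e':
--             return True
--         else:
--             return False
--
-- def __find_all_decimal__(string_phase):
--     # single-pass tokenizer: no mask string, no split
--     result = []
--     cur = ""
--     for c in string_phase:
--         if isac(c):
--             cur += c
--         else:
--             result.append(cur)
--             cur = ""
--     result.append(cur)
--     return result
-- ===== Notes on version B (the rewrite author's own statement) =====
-- stated objective: simpler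
-- what changed: Replaced A's build-a-masked-copy-then-split(' ') two-phase approach with a single-pass tokenizer that accumulates the current token and emits it at each non-decimal character, so no intermediate mask string and no split call.
import Mathlib
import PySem

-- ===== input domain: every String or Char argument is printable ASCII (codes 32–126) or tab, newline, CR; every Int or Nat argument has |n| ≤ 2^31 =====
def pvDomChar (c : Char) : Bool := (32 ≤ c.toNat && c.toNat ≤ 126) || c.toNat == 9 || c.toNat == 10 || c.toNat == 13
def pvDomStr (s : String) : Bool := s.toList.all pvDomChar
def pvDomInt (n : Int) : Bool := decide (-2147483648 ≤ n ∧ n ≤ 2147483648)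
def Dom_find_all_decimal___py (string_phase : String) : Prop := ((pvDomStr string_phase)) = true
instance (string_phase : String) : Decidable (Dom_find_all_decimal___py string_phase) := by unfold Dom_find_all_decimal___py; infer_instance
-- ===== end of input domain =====

-- B replaces A's build-a-mask-string-then-split(' ') with a single-pass tokenizer (objective: simpler, one pass, no intermediate mask string).

-- ===== PORT A =====
-- helper isac (shared verbatim by both Pythons): try int(c) / except membership test
def isac (c : Char) : Bool :=
  match PySem.Int.ofStr? (String.mk [c]) with
  | some _ => true
  | none => if c = '.' ∨ c = '-' ∨ c = 'e' then true else false

-- decimals is a Python str built by +=; represented as List Char (PySem convention), split(' ') = Chars.splitOn with sep [' ']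
def find_all_decimal___py (string_phase : String) : List String :=
  let decimals : List Char :=
    string_phase.toList.foldl (fun acc c => acc ++ (if isac c then [c] else [' '])) []
  (PySem.Chars.splitOn decimals [' ']).map String.mk

-- ===== PORT B =====
-- tokenizer loop of Source B: cur accumulates while isac; a delimiter emits cur and resets it; the final cur is emitted after the loop
def tokB : List Char → List Char → List String
  | [], cur => [String.mk cur]
  | c :: rest, cur => if isac c then tokB rest (cur ++ [c]) else String.mk cur :: tokB rest []

def find_all_decimal___py_alt (string_phase : String) : List String :=
  tokB string_phase.toList []

-- ===== PRECONDITION & SPEC =====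
def Spec_find_all_decimal___py (string_phase : String) (out : List String) : Prop := out = find_all_decimal___py_alt string_phase
instance (string_phase : String) (out : List String) : Decidable (Spec_find_all_decimal___py string_phase out) := by unfold Spec_find_all_decimal___py; infer_instance

-- ===== CLAIM (what is proved, stated in full; the proofs are below) =====
def Claim_equal_find_all_decimal___py : Prop := ∀ (string_phase : String), Dom_find_all_decimal___py string_phase → Spec_find_all_decimal___py string_phase (find_all_decimal___py string_phase)

-- ===== LEMMAS AND PROOFS =====

-- reference splitter on single-char separator ' '
def splitChar : List Char → List (List Char)
  | [] => [[]]
  | c :: rest => if c = ' ' then [] :: splitChar rest else (splitChar rest).modifyHead (c :: ·)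

lemma append_comp_cons (cur : List Char) (c : Char) :
    ((cur ++ [c]) ++ ·) = ((cur ++ ·) ∘ (c :: ·)) := by
  funext x; simp

lemma modifyHead_modifyHead {α : Type} (f g : α → α) (l : List α) :
    (l.modifyHead g).modifyHead f = l.modifyHead (f ∘ g) := by
  cases l <;> simp

lemma go_spec : ∀ (fuel : Nat) (l cur : List Char) (acc : List (List Char)), l.length < fuel →
    PySem.Chars.splitOn.go [' '] fuel l cur acc
      = acc.reverse ++ (splitChar l).modifyHead (cur.reverse ++ ·) := by
  intro fuel
  induction fuel with
  | zero => intro l cur acc h; omega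
  | succ f ih =>
    intro l cur acc h
    cases l with
    | nil =>
      simp [PySem.Chars.splitOn.go, splitChar]
    | cons c rest =>
      by_cases hc : c = ' '
      · subst hc
        rw [show PySem.Chars.splitOn.go [' '] (f+1) (' ' :: rest) cur acc
            = PySem.Chars.splitOn.go [' '] f rest [] (cur.reverse :: acc) by
          simp [PySem.Chars.splitOn.go]]
        rw [ih rest [] (cur.reverse :: acc) (by simpa using Nat.lt_of_succ_lt_succ h)]
        simp [splitChar, List.modifyHead]
        cases splitChar rest <;> simp
      · rw [show PySem.Chars.splitOn.go [' '] (f+1) (c :: rest) cur acc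
            = PySem.Chars.splitOn.go [' '] f rest (c :: cur) acc by
          simp only [PySem.Chars.splitOn.go, List.isPrefixOf, List.drop]
          rw [if_neg]
          simp only [beq_iff_eq, Bool.and_eq_true, decide_eq_true_eq]
          intro hx
          exact hc hx.1.symm]
        rw [ih rest (c :: cur) acc (by simpa using Nat.lt_of_succ_lt_succ h)]
        simp only [splitChar, hc, if_neg, not_false_iff, modifyHead_modifyHead,
          List.reverse_cons, append_comp_cons]

lemma splitOn_space (l : List Char) :
    PySem.Chars.splitOn l [' '] = splitChar l := by
  rw [show PySem.Chars.splitOn l [' '] = PySem.Chars.splitOn.go [' '] (l.length + 1) l [] [] from rfl]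
  rw [go_spec (l.length + 1) l [] [] (by omega)]
  simp
  cases splitChar l <;> simp

lemma isac_space : isac ' ' = false := by decide

def maskChar (c : Char) : Char := if isac c then c else ' '

lemma foldl_mask (cs : List Char) : ∀ acc : List Char,
    cs.foldl (fun acc c => acc ++ (if isac c then [c] else [' '])) acc = acc ++ cs.map maskChar := by
  induction cs with
  | nil => intro acc; simp
  | cons c rest ih =>
    intro acc
    simp only [List.foldl, List.map, ih, maskChar]
    split_ifs <;> simp

lemma tokB_spec (cs : List Char) : ∀ cur : List Char,
    tokB cs cur = ((splitChar (cs.map maskChar)).modifyHead (cur ++ ·)).map String.mk := by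
  induction cs with
  | nil => intro cur; simp [tokB, splitChar, List.modifyHead]
  | cons c rest ih =>
    intro cur
    by_cases hc : isac c
    · have hcs : maskChar c ≠ ' ' := by
        intro h
        simp only [maskChar, hc, if_true] at h
        rw [h] at hc
        simp [isac_space] at hc
      simp only [tokB, hc, if_true, List.map]
      rw [ih (cur ++ [c])]
      simp only [splitChar, hcs, if_neg, not_false_iff, modifyHead_modifyHead,
        append_comp_cons]
      simp only [maskChar, hc, if_true]
    · simp only [tokB, hc, if_neg, List.map, maskChar]
      rw [ih []]
      simp [splitChar, hc, List.modifyHead]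
      cases splitChar (rest.map maskChar) <;> simp

-- ===== VERDICT (by name: the statement is the Claim_ definition above) =====
theorem find_all_decimal___py_spec : Claim_equal_find_all_decimal___py := by
  intro s _
  unfold Spec_find_all_decimal___py find_all_decimal___py find_all_decimal___py_alt
  rw [tokB_spec]
  simp only [foldl_mask, List.nil_append, splitOn_space]
  congr 1
  cases splitChar (s.toList.map maskChar) <;> simp
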